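-- pv_equiv track=rewrite | github.com/ThirtyNimrod/catprep-local | utils/kg_visualizer.py | filter_triples
-- ===== SOURCE A (Python) =====
-- from typing import Optional
--
-- def filter_triples(
--     triples: list[tuple[str, str, str]],
--     subject: Optional[str] = None,
--     predicate: Optional[str] = None,
--     object_: Optional[str] = None,
-- ) -> list[tuple[str, str, str]]:
--     """Filter triples by subject, predicate, and/or object.
--
--     Pass ``None`` or empty string to skip a filter dimension.
--     """
--     result = triples
--     if subject:
--         result = [t for t in result if t[0] == subject]
--     if predicate:
--         result = [t for t in result if t[1] == predicate]
--     if object_: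
--         result = [t for t in result if t[2] == object_]
--     return result
-- ===== SOURCE B (Python) =====
-- from typing import Optional
--
-- def filter_triples(
--     triples: list[tuple[str, str, str]],
--     subject: Optional[str] = None,
--     predicate: Optional[str] = None,
--     object_: Optional[str] = None,
-- ) -> list[tuple[str, str, str]]:
--     """Table-driven recursive filter: build the list of active (position, value)
--     constraints once, then accumulate the triples that satisfy every
--     constraint (checked by recursion over the table)."""
--     checks = [(i, v) for i, v in enumerate((subject, predicate, object_)) if v]
--
--     def matches(t, cs):
--         if not cs:
--             return True
--         i, v = cs[0]
--         return t[i] == v and matches(t, cs[1:])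
--
--     out = []
--     for t in triples:
--         if matches(t, checks):
--             out.append(t)
--     return out
-- ===== Notes on version B (the rewrite author's own statement) =====
-- stated objective: alternative
-- what changed: Instead of A's three staged list comprehensions (one optional pass per dimension), B builds a constraint table of active (position, value) pairs once and accumulates the result in one loop, testing each triple against the table by recursion.
import Mathlib
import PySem

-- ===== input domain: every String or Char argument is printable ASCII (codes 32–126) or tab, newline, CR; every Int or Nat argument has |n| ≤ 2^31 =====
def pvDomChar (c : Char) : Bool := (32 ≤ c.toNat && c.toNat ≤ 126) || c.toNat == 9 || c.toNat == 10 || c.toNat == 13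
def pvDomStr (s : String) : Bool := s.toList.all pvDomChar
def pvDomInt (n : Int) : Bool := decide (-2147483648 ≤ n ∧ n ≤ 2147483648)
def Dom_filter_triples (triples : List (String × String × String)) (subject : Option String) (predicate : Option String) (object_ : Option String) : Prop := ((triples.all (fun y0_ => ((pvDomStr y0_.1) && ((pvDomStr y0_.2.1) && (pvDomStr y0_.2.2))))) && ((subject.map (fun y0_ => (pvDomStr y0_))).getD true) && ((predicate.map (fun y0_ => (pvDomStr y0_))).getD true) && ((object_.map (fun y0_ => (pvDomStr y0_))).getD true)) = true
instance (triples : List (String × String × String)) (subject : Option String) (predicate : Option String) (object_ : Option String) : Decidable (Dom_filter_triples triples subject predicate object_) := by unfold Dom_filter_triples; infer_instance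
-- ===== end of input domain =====

-- B builds a table of active (position, value) constraints once and recursively rebuilds
-- the list, instead of A's three staged comprehensions; objective: alternative decomposition.

-- ===== PORT A =====
-- Port of A: staged filters, each guarded by Python truthiness of the optional string
-- (`if subject:` is true iff subject is not None and not "").
def filter_triples (triples : List (String × String × String)) (subject : Option String) (predicate : Option String) (object_ : Option String) : List (String × String × String) :=
  let result := triples
  let result := match subject with
    | some s => if s ≠ "" then result.filter (fun t => t.1 == s) else result
    | none => result
  let result := match predicate with
    | some p => if p ≠ "" then result.filter (fun t => t.2.1 == p) else result
    | none => result
  let result := match object_ with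
    | some o => if o ≠ "" then result.filter (fun t => t.2.2 == o) else result
    | none => result
  result

-- ===== PORT B =====
-- checks = [(i, v) for i, v in enumerate((subject, predicate, object_)) if v]
def pvChecks (subject predicate object_ : Option String) : List (Nat × String) :=
  ([(0, subject), (1, predicate), (2, object_)] : List (Nat × Option String)).filterMap
    (fun iv => match iv.2 with
      | some v => if v ≠ "" then some (iv.1, v) else none
      | none => none)

-- t[i] for a 3-tuple
def pvField (t : String × String × String) (i : Nat) : String :=
  if i = 0 then t.1 else if i = 1 then t.2.1 else t.2.2

-- matches(t, cs): recursion over the constraint table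
def pvMatches (t : String × String × String) : List (Nat × String) → Bool
  | [] => true
  | c :: cs => pvField t c.1 == c.2 && pvMatches t cs

def filter_triples_alt (triples : List (String × String × String)) (subject : Option String) (predicate : Option String) (object_ : Option String) : List (String × String × String) :=
  let checks := pvChecks subject predicate object_
  triples.foldl (fun out t => if pvMatches t checks then out ++ [t] else out) []

-- ===== PRECONDITION & SPEC =====
def Spec_filter_triples (triples : List (String × String × String)) (subject : Option String) (predicate : Option String) (object_ : Option String) (out : List (String × String × String)) : Prop := out = filter_triples_alt triples subject predicate object_
instance (triples : List (String × String × String)) (subject : Option String) (predicate : Option String) (object_ : Option String) (out : List (String × String × String)) : Decidable (Spec_filter_triples triples subject predicate object_ out) := by unfold Spec_filter_triples; infer_instance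

-- ===== CLAIM (what is proved, stated in full; the proofs are below) =====
def Claim_equal_filter_triples : Prop := ∀ (triples : List (String × String × String)) (subject : Option String) (predicate : Option String) (object_ : Option String), Dom_filter_triples triples subject predicate object_ → Spec_filter_triples triples subject predicate object_ (filter_triples triples subject predicate object_)

-- ===== LEMMAS AND PROOFS =====

-- One cons step of the constraint-table construction.
def pvStepL (o : Option String) (i : Nat) (rest : List (Nat × String)) : List (Nat × String) :=
  match o with
  | some v => if v ≠ "" then (i, v) :: rest else rest
  | none => rest

theorem pvChecks_eq (s p o : Option String) :
    pvChecks s p o = pvStepL s 0 (pvStepL p 1 (pvStepL o 2 [])) := by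
  cases s <;> cases p <;> cases o <;>
    simp only [pvChecks, pvStepL, List.filterMap_cons, List.filterMap_nil] <;>
    split_ifs <;> simp_all

theorem pvMatch_step (o : Option String) (i : Nat) (rest : List (Nat × String))
    (t : String × String × String) :
    pvMatches t (pvStepL o i rest) =
      ((match o with | none => true | some s => s == "" || pvField t i == s) &&
        pvMatches t rest) := by
  cases o with
  | none => simp [pvStepL]
  | some v =>
    by_cases h : v = ""
    · simp [pvStepL, h]
    · simp [pvStepL, h, pvMatches, beq_eq_false_iff_ne.mpr h]

-- Testing a triple against the built table equals the three per-dimension tests.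
theorem pvMatches_checks (subject predicate object_ : Option String) (t : String × String × String) :
    pvMatches t (pvChecks subject predicate object_) =
      ((match subject with | none => true | some s => s == "" || t.1 == s) &&
       (match predicate with | none => true | some s => s == "" || t.2.1 == s) &&
       (match object_ with | none => true | some s => s == "" || t.2.2 == s)) := by
  rw [pvChecks_eq, pvMatch_step, pvMatch_step, pvMatch_step]
  simp [pvMatches, pvField, Bool.and_assoc]

-- One staged (truthiness-guarded) filter of A equals a single filter by a per-element test.
theorem pvStage1 (o : Option String) (l : List (String × String × String)) :
    (match o with
      | some s => if s ≠ "" then l.filter (fun t => t.1 == s) else l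
      | none => l) =
    l.filter (fun t => match o with | none => true | some s => s == "" || t.1 == s) := by
  cases o with
  | none => simp
  | some s =>
    by_cases h : s = "" <;> simp only [h, ne_eq, not_true_eq_false, if_false,
      not_false_eq_true, if_true]
    · simp
    · exact List.filter_congr fun x _ => by simp [h]

theorem pvStage2 (o : Option String) (l : List (String × String × String)) :
    (match o with
      | some s => if s ≠ "" then l.filter (fun t => t.2.1 == s) else l
      | none => l) =
    l.filter (fun t => match o with | none => true | some s => s == "" || t.2.1 == s) := by
  cases o with
  | none => simp
  | some s =>
    by_cases h : s = "" <;> simp only [h, ne_eq, not_true_eq_false, if_false,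
      not_false_eq_true, if_true]
    · simp
    · exact List.filter_congr fun x _ => by simp [h]

theorem pvStage3 (o : Option String) (l : List (String × String × String)) :
    (match o with
      | some s => if s ≠ "" then l.filter (fun t => t.2.2 == s) else l
      | none => l) =
    l.filter (fun t => match o with | none => true | some s => s == "" || t.2.2 == s) := by
  cases o with
  | none => simp
  | some s =>
    by_cases h : s = "" <;> simp only [h, ne_eq, not_true_eq_false, if_false,
      not_false_eq_true, if_true]
    · simp
    · exact List.filter_congr fun x _ => by simp [h]

-- ===== VERDICT (by name: the statement is the Claim_ definition above) =====
theorem filter_triples_spec : Claim_equal_filter_triples := by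
  intro triples subject predicate object_ _
  unfold Spec_filter_triples filter_triples filter_triples_alt
  dsimp only
  rw [pvStage1, pvStage2, pvStage3, List.filter_filter, List.filter_filter,
    PySem.List.foldl_append_if_eq_filter, List.nil_append]
  exact (List.filter_congr fun x _ => by rw [pvMatches_checks]; ac_rfl).symm
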